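-- pv_equiv track=rewrite | github.com/omer1357/Fake_News_Detection | FakeNewsDetector.py | makeDic
-- ===== SOURCE A (Python) =====
-- def makeDic(texts):
--     words = []
--     dic = {}
--     cnt = 1
--     for sen in texts:
--         for word in sen.split():
--             if word not in words:
--                 if word.encode().isalpha():
--                     words.append(word)
--     words.sort()
--     for word in words:
--         if word not in dic:
--             dic[word] = cnt
--             cnt += 1
--     return dic
-- ===== SOURCE B (Python) =====
-- def makeDic(texts):
--     uniq = {w for sen in texts for w in sen.split() if w.encode().isalpha()}
--     dic = {}
--     cnt = 1
--     while uniq: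
--         m = min(uniq)
--         dic[m] = cnt
--         uniq.discard(m)
--         cnt += 1
--     return dic
-- ===== Notes on version B (the rewrite author's own statement) =====
-- stated objective: alternative
-- what changed: B never sorts: it deduplicates up front with a set comprehension and then builds the dict by repeatedly extracting the minimum of the remaining set (selection-style), replacing A's quadratic membership-list dedup + library sort + dict-membership pass.
import Mathlib
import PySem

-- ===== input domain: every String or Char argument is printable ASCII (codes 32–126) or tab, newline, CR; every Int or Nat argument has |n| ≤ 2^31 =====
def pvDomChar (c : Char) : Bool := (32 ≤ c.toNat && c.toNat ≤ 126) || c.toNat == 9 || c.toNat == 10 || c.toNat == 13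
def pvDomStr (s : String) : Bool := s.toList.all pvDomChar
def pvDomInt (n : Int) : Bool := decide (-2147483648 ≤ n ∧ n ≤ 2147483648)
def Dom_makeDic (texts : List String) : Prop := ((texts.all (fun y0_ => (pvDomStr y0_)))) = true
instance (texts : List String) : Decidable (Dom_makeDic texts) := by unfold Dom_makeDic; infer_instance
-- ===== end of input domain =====

-- B builds the dict without sorting: set-comprehension dedup, then repeated minimum
-- extraction from the remaining set assigns the ids (alternative algorithm, similar cost).

-- ===== PORT A =====
def makeDic (texts : List String) : List (String × Int) :=
  let words := texts.foldl (fun ws sen =>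
      (PySem.Str.split₀ sen).foldl (fun ws w =>
        if w ∈ ws then ws
        else if PySem.Str.strIsalpha w then ws ++ [w] else ws) ws) []
  let sortedWords := PySem.List.sorted words (fun w => w) false
  let r := sortedWords.foldl (fun (st : PySem.Dict String Int × Int) w =>
      if st.1.contains w then st else (st.1.insert w st.2, st.2 + 1))
    (PySem.Dict.empty, 1)
  r.1.items

-- ===== PORT B =====
-- used by the port's decreasing_by (min is a member; discarding a member shrinks the set)
theorem pvDiscard_lt (S : List String) (m : String) (hm : m ∈ S) :
    (PySem.Set.discard S m).length < S.length := by
  simp only [PySem.Set.discard]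
  exact List.length_filter_lt_length_iff_exists.mpr ⟨m, hm, by simp⟩

-- the 'while uniq: m = min(uniq); dic[m] = cnt; uniq.discard(m); cnt += 1' loop
def pvAltLoop (uniq : PySem.Set String) (d : PySem.Dict String Int) (c : Int) :
    PySem.Dict String Int :=
  match h : PySem.List.min? uniq (fun w => w) with
  | none => d
  | some m => pvAltLoop (PySem.Set.discard uniq m) (d.insert m c) (c + 1)
termination_by uniq.length
decreasing_by exact pvDiscard_lt _ _ (PySem.List.min?_mem h)

def makeDic_alt (texts : List String) : List (String × Int) :=
  let uniq : PySem.Set String := PySem.Set.ofList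
    (texts.flatMap (fun sen => (PySem.Str.split₀ sen).filter PySem.Str.strIsalpha))
  (pvAltLoop uniq PySem.Dict.empty 1).items

-- ===== PRECONDITION & SPEC =====
def Spec_makeDic (texts : List String) (out : List (String × Int)) : Prop := out = makeDic_alt texts
instance (texts : List String) (out : List (String × Int)) : Decidable (Spec_makeDic texts out) := by unfold Spec_makeDic; infer_instance

-- ===== CLAIM (what is proved, stated in full; the proofs are below) =====
def Claim_equal_makeDic : Prop := ∀ (texts : List String), Dom_makeDic texts → Spec_makeDic texts (makeDic texts)

-- ===== LEMMAS AND PROOFS =====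

-- canonical id-assigning loop both ports reduce to
def pvAssign (ws : List String) (d : PySem.Dict String Int) (c : Int) : PySem.Dict String Int :=
  match ws with
  | [] => d
  | w :: ws => pvAssign ws (d.insert w c) (c + 1)

-- the order in which pvAltLoop visits the set's elements
def pvExtract (S : List String) : List String :=
  match h : PySem.List.min? S (fun w => w) with
  | none => []
  | some m => m :: pvExtract (PySem.Set.discard S m)
termination_by S.length
decreasing_by exact pvDiscard_lt _ _ (PySem.List.min?_mem h)

theorem pvAltLoop_eq_assign (n : Nat) : ∀ (S : List String), S.length ≤ n →
    ∀ d c, pvAltLoop S d c = pvAssign (pvExtract S) d c := by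
  induction n with
  | zero =>
    intro S hS d c
    have : S = [] := List.length_eq_zero_iff.mp (Nat.le_zero.mp hS)
    subst this
    rw [pvAltLoop, pvExtract]
    rfl
  | succ n ih =>
    intro S hS d c
    rw [pvAltLoop, pvExtract]
    cases h : PySem.List.min? S (fun w => w) with
    | none => rfl
    | some m =>
      have hlt := pvDiscard_lt S m (PySem.List.min?_mem h)
      simp only [pvAssign]
      exact ih _ (by omega) _ _

theorem pvExtract_spec (n : Nat) : ∀ (S : List String), S.length ≤ n → S.Nodup →
    (pvExtract S).Perm S ∧ (pvExtract S).Pairwise (· < ·) := by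
  induction n with
  | zero =>
    intro S hS _
    have : S = [] := List.length_eq_zero_iff.mp (Nat.le_zero.mp hS)
    subst this
    rw [pvExtract]
    exact ⟨List.Perm.refl _, List.Pairwise.nil⟩
  | succ n ih =>
    intro S hS hnd
    rw [pvExtract]
    cases h : PySem.List.min? S (fun w => w) with
    | none =>
      have : S = [] := (PySem.List.min?_eq_none_iff S _).mp h
      subst this
      exact ⟨List.Perm.refl _, List.Pairwise.nil⟩
    | some m =>
      have hm : m ∈ S := PySem.List.min?_mem h
      have hmin : ∀ y ∈ S, m ≤ y := fun y hy => PySem.List.min?_isMin h y hy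
      have hlt := pvDiscard_lt S m hm
      have hndD : (PySem.Set.discard S m).Nodup := PySem.Set.nodup_discard S m hnd
      obtain ⟨hperm, hpw⟩ := ih (PySem.Set.discard S m) (by omega) hndD
      have hmemE : ∀ x ∈ pvExtract (PySem.Set.discard S m), x ∈ S ∧ x ≠ m := by
        intro x hx
        exact (PySem.Set.mem_discard S m x).mp (hperm.mem_iff.mp hx)
      constructor
      · -- m :: discard S m is a permutation of S (same members, both Nodup)
        refine (List.Perm.cons m hperm).trans ?_
        apply (List.perm_ext_iff_of_nodup ?_ hnd).mpr
        · intro x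
          rw [List.mem_cons, PySem.Set.mem_discard]
          constructor
          · rintro (rfl | ⟨hx, _⟩) <;> [exact hm; exact hx]
          · intro hx
            by_cases hxm : x = m
            · exact Or.inl hxm
            · exact Or.inr ⟨hx, hxm⟩
        · refine List.nodup_cons.mpr ⟨?_, hndD⟩
          intro hcon
          exact ((PySem.Set.mem_discard S m m).mp hcon).2 rfl
      · refine List.pairwise_cons.mpr ⟨?_, hpw⟩
        intro x hx
        obtain ⟨hxS, hxm⟩ := hmemE x hx
        exact lt_of_le_of_ne (hmin x hxS) (Ne.symm hxm)

-- A's word-collecting double loop is Set-building over the filtered token stream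
theorem pvA_phase1 (M : List String) (ws : List String)
    (hws : ∀ x ∈ ws, PySem.Str.strIsalpha x = true) :
    M.foldl (fun ws w =>
        if w ∈ ws then ws
        else if PySem.Str.strIsalpha w then ws ++ [w] else ws) ws
      = PySem.Set.update ws (M.filter PySem.Str.strIsalpha) := by
  induction M generalizing ws with
  | nil => simp [PySem.Set.update]
  | cons w M ih =>
    by_cases ha : PySem.Str.strIsalpha w = true
    · have hstep : (if w ∈ ws then ws else if PySem.Str.strIsalpha w then ws ++ [w] else ws)
          = PySem.Set.add ws w := by
        simp only [PySem.Set.add, PySem.Set.contains, ha, if_true, List.contains_iff_mem]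
      have hinv : ∀ x ∈ PySem.Set.add ws w, PySem.Str.strIsalpha x = true := by
        intro x hx
        rcases (PySem.Set.mem_add ws w x).mp hx with h | h
        · exact hws x h
        · exact h ▸ ha
      rw [List.foldl_cons, hstep, List.filter_cons_of_pos ha, ih (PySem.Set.add ws w) hinv]
      simp [PySem.Set.update]
    · have hnot : w ∉ ws := fun h => ha (hws w h)
      rw [List.foldl_cons, if_neg hnot, if_neg ha,
        List.filter_cons_of_neg (by simp only [Bool.not_eq_true] at ha; simpa using ha), ih ws hws]

-- A's dict-filling loop over a Nodup list of fresh keys is pvAssign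
theorem pvA_phase2 (D : List String) (d : PySem.Dict String Int) (c : Int)
    (hnd : D.Nodup) (hfresh : ∀ w ∈ D, d.contains w = false) :
    (D.foldl (fun (st : PySem.Dict String Int × Int) w =>
        if st.1.contains w then st else (st.1.insert w st.2, st.2 + 1)) (d, c)).1
      = pvAssign D d c := by
  induction D generalizing d c with
  | nil => rfl
  | cons w ws ih =>
    have hw : d.contains w = false := hfresh w (by simp)
    have hrest : ∀ x ∈ ws, (d.insert w c).contains x = false := by
      intro x hx
      rw [PySem.Dict.contains_insert]
      have hxw : x ≠ w := by rintro rfl; exact (List.nodup_cons.mp hnd).1 hx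
      simp [hxw, hfresh x (List.mem_cons_of_mem _ hx)]
    simp [List.foldl_cons, hw, pvAssign,
      ih (d.insert w c) (c + 1) (List.nodup_cons.mp hnd).2 hrest]

-- ===== VERDICT (by name: the statement is the Claim_ definition above) =====
theorem makeDic_spec : Claim_equal_makeDic := by
  intro texts _
  show makeDic texts = makeDic_alt texts
  unfold makeDic makeDic_alt
  dsimp only
  have hL : texts.foldl (fun ws sen =>
      (PySem.Str.split₀ sen).foldl (fun ws w =>
        if w ∈ ws then ws
        else if PySem.Str.strIsalpha w then ws ++ [w] else ws) ws) []
      = PySem.Set.ofList (texts.flatMap (fun sen =>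
          (PySem.Str.split₀ sen).filter PySem.Str.strIsalpha)) := by
    rw [← List.foldl_flatMap, pvA_phase1 _ _ (by simp), List.filter_flatMap]
    rfl
  set S := PySem.Set.ofList (texts.flatMap (fun sen =>
      (PySem.Str.split₀ sen).filter PySem.Str.strIsalpha)) with hSdef
  have hndS : S.Nodup := PySem.Set.nodup_ofList _
  obtain ⟨hperm, hpw⟩ := pvExtract_spec S.length S le_rfl hndS
  have hsorted : PySem.List.sorted S (fun w => w) false = pvExtract S :=
    PySem.List.sorted_eq_of_perm_of_pairwise_lt S (pvExtract S) (fun w => w) hperm hpw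
  have hndE : (pvExtract S).Nodup := hperm.nodup_iff.mpr hndS
  rw [hL, hsorted, pvA_phase2 _ _ _ hndE (fun w _ => PySem.Dict.contains_empty w),
    pvAltLoop_eq_assign S.length S le_rfl]
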